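-- pv_equiv track=rewrite | github.com/muratyigitartuk/KERN | app/rag.py | _extract_labeled_value
-- ===== SOURCE A (Python) =====
-- def _extract_labeled_value(text: str, labels: tuple[str, ...]) -> str | None:
--     for line in text.splitlines():
--         stripped = line.strip()
--         lowered = stripped.lower()
--         for label in labels:
--             if lowered.startswith(f"{label}:"):
--                 return stripped.split(":", 1)[1].strip().rstrip(".")
--     return None
-- ===== SOURCE B (Python) =====
-- def _extract_labeled_value(text: str, labels: tuple[str, ...]) -> str | None:
--     # Label-outer traversal: strip and lowercase all lines once, then for each
--     # label find the first matching line index, keep the minimal index overall,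
--     # and extract the value once at the end.
--     lines = [line.strip() for line in text.splitlines()]
--     lows = [s.lower() for s in lines]
--     best = None
--     for label in labels:
--         prefix = label + ":"
--         for i, s in enumerate(lows):
--             if s.startswith(prefix):
--                 if best is None or i < best:
--                     best = i
--                 break
--     if best is None:
--         return None
--     return lines[best].split(":", 1)[1].strip().rstrip(".")
-- ===== Notes on version B (the rewrite author's own statement) =====
-- stated objective: alternative
-- what changed: B inverts the loop nesting: it strips all lines once, then for each label finds the first matching line index (labels outer, lines inner), keeps the minimal index, and extracts the value once at the end; this is correct because the returned value depends only on the matched line, not the label, so the first matching line equals the line of minimal per-label first-match index.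
import Mathlib
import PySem

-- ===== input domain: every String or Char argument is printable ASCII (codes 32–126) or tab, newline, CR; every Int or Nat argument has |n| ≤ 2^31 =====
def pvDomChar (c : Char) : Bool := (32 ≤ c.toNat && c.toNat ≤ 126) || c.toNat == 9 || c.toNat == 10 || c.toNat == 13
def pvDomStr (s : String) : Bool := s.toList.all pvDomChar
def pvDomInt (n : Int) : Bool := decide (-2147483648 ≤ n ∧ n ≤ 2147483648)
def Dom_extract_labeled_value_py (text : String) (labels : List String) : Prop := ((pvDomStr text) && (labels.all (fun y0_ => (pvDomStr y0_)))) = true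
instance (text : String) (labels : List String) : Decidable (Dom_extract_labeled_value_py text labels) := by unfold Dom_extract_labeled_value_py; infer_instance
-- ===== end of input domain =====

-- B inverts the loop nesting: labels outer, lines inner, keeping the minimal matching line
-- index, with one extraction at the end (objective: alternative traversal, same result).

-- ===== PORT A =====
-- s.rstrip(".") ported by hand (drop '.' code points from the right; exact over code points)
def pvRstripDot (s : String) : String :=
  String.ofList (s.toList.reverse.dropWhile (· == '.')).reverse

-- stripped.split(":", 1)[1].strip().rstrip(".")  — the value extraction both Pythons contain verbatim;
-- the 'none' arm is Python's IndexError, unreachable since every caller guarantees a colon.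
def pvExtractValue (stripped : String) : Option String :=
  match PySem.List.pyGet? ((PySem.Str.splitMax? stripped ":" 1).getD []) 1 with
  | some v => some (pvRstripDot (PySem.Str.strip v))
  | none => none

-- inner 'for label in labels' loop of A
def pvInnerA (stripped lowered : String) : List String → Option String
  | [] => none
  | label :: rest =>
    if PySem.Str.startswith lowered (label ++ ":") then pvExtractValue stripped
    else pvInnerA stripped lowered rest

-- outer 'for line in text.splitlines()' loop of A
def pvLinesA (labels : List String) : List String → Option String
  | [] => none
  | line :: rest =>
    let stripped := PySem.Str.strip line
    let lowered := PySem.Str.lower stripped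
    match pvInnerA stripped lowered labels with
    | some v => some v
    | none => pvLinesA labels rest

def extract_labeled_value_py (text : String) (labels : List String) : Option String :=
  pvLinesA labels (PySem.Str.splitlines text)

-- ===== PORT B =====
-- inner 'for i, s in enumerate(lows): … break' loop of B: first index of a line starting with the prefix
def pvFindIdxB (pre : String) : List String → Nat → Option Nat
  | [], _ => none
  | s :: rest, i =>
    if PySem.Str.startswith s pre then some i
    else pvFindIdxB pre rest (i + 1)

-- outer 'for label in labels' loop of B: fold the 'best' accumulator over the labels
def pvBestB (lows : List String) (labels : List String) : Option Nat :=
  labels.foldl (fun best label =>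
    match pvFindIdxB (label ++ ":") lows 0 with
    | none => best
    | some i => match best with
                | none => some i
                | some b => if i < b then some i else some b) none

def extract_labeled_value_py_alt (text : String) (labels : List String) : Option String :=
  let lines := (PySem.Str.splitlines text).map PySem.Str.strip
  let lows := lines.map PySem.Str.lower
  match pvBestB lows labels with
  | none => none
  | some b =>
    match PySem.List.pyGet? lines (b : Int) with
    | some s => pvExtractValue s
    | none => none

-- ===== PRECONDITION & SPEC =====
def Spec_extract_labeled_value_py (text : String) (labels : List String) (out : Option String) : Prop := out = extract_labeled_value_py_alt text labels
instance (text : String) (labels : List String) (out : Option String) : Decidable (Spec_extract_labeled_value_py text labels out) := by unfold Spec_extract_labeled_value_py; infer_instance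

-- ===== CLAIM (what is proved, stated in full; the proofs are below) =====
def Claim_equal_extract_labeled_value_py : Prop := ∀ (text : String) (labels : List String), Dom_extract_labeled_value_py text labels → Spec_extract_labeled_value_py text labels (extract_labeled_value_py text labels)

-- ===== LEMMAS AND PROOFS =====

-- generic first-index scan (proof-side abstraction of pvFindIdxB)
def pvFirstIdx (q : String → Bool) : List String → Nat → Option Nat
  | [], _ => none
  | s :: rest, i => if q s then some i else pvFirstIdx q rest (i + 1)

-- the 'best' combination step of B's fold, as a binary operation
def pvCmb (a b : Option Nat) : Option Nat :=
  match b with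
  | none => a
  | some i => match a with
              | none => some i
              | some b' => if i < b' then some i else some b'

-- pvFindIdxB over the lowered lines is pvFirstIdx of the composed predicate over the lines
theorem pvFindIdxB_eq (p : String) (M : List String) (k : Nat) :
    pvFindIdxB p (M.map PySem.Str.lower) k =
      pvFirstIdx (fun s => PySem.Str.startswith (PySem.Str.lower s) p) M k := by
  induction M generalizing k with
  | nil => rfl
  | cons s rest ih => simp only [List.map_cons, pvFindIdxB, pvFirstIdx, ih]

theorem pvFirstIdx_ge (q : String → Bool) (M : List String) (k j : Nat)
    (h : pvFirstIdx q M k = some j) : k ≤ j := by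
  induction M generalizing k with
  | nil => simp [pvFirstIdx] at h
  | cons s rest ih =>
    simp only [pvFirstIdx] at h
    split at h
    · simp only [Option.some.injEq] at h; omega
    · have := ih (k + 1) h; omega

theorem pvCmb_some_some (a b : Nat) : pvCmb (some a) (some b) = some (min a b) := by
  simp only [pvCmb, Nat.min_def]
  split_ifs <;> (first | rfl | (congr 1; omega))

theorem pvCmb_none_left (o : Option Nat) : pvCmb none o = o := by cases o <;> rfl

theorem pvCmb_none_right (o : Option Nat) : pvCmb o none = o := rfl

theorem pvCmb_assoc (a b c : Option Nat) : pvCmb (pvCmb a b) c = pvCmb a (pvCmb b c) := by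
  cases a with
  | none => rw [pvCmb_none_left, pvCmb_none_left]
  | some x =>
    cases b with
    | none => rw [pvCmb_none_right, pvCmb_none_left]
    | some y =>
      cases c with
      | none => rw [pvCmb_none_right, pvCmb_none_right]
      | some z =>
        simp only [pvCmb_some_some]
        rw [Nat.min_assoc]

theorem pvFirstIdx_false (M : List String) (k : Nat) :
    pvFirstIdx (fun _ => false) M k = none := by
  induction M generalizing k with
  | nil => rfl
  | cons s rest ih => simp [pvFirstIdx, ih]

theorem pvCmb_firstIdx (q1 q2 : String → Bool) (M : List String) (k : Nat) :
    pvCmb (pvFirstIdx q1 M k) (pvFirstIdx q2 M k) =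
      pvFirstIdx (fun s => q1 s || q2 s) M k := by
  induction M generalizing k with
  | nil => rfl
  | cons s rest ih =>
    simp only [pvFirstIdx]
    by_cases h1 : q1 s = true
    · simp only [h1, Bool.true_or, if_true]
      by_cases h2 : q2 s = true
      · simp [h2, pvCmb]
      · simp only [Bool.not_eq_true] at h2
        simp only [h2, Bool.false_eq_true, if_false]
        cases hj : pvFirstIdx q2 rest (k + 1) with
        | none => rfl
        | some j =>
          have := pvFirstIdx_ge q2 rest (k + 1) j hj
          simp only [pvCmb]
          rw [if_neg (by omega)]
    · simp only [Bool.not_eq_true] at h1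
      simp only [h1, Bool.false_or, Bool.false_eq_true, if_false]
      by_cases h2 : q2 s = true
      · simp only [h2, if_true]
        cases hj : pvFirstIdx q1 rest (k + 1) with
        | none => rfl
        | some j =>
          have := pvFirstIdx_ge q1 rest (k + 1) j hj
          simp only [pvCmb]
          rw [if_pos (by omega)]
      · simp only [Bool.not_eq_true] at h2
        simp only [h2, Bool.false_eq_true, if_false, ih]

theorem pvBestB_eq (M : List String) (labels : List String) :
    pvBestB (M.map PySem.Str.lower) labels =
      pvFirstIdx (fun s => labels.any fun l =>
        PySem.Str.startswith (PySem.Str.lower s) (l ++ ":")) M 0 := by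
  have key : ∀ (ls : List String) (acc : Option Nat),
      ls.foldl (fun best label =>
        match pvFindIdxB (label ++ ":") (M.map PySem.Str.lower) 0 with
        | none => best
        | some i => match best with
                    | none => some i
                    | some b => if i < b then some i else some b) acc =
      pvCmb acc (pvFirstIdx (fun s => ls.any fun l =>
        PySem.Str.startswith (PySem.Str.lower s) (l ++ ":")) M 0) := by
    intro ls
    induction ls with
    | nil => intro acc; simp [pvFirstIdx_false, pvCmb]
    | cons l rest ih =>
      intro acc
      rw [List.foldl_cons, ih]
      have hstep : (match pvFindIdxB (l ++ ":") (M.map PySem.Str.lower) 0 with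
        | none => acc
        | some i => match acc with
                    | none => some i
                    | some b => if i < b then some i else some b) =
          pvCmb acc (pvFindIdxB (l ++ ":") (M.map PySem.Str.lower) 0) := by
        cases pvFindIdxB (l ++ ":") (M.map PySem.Str.lower) 0 <;> cases acc <;> rfl
      rw [hstep, pvFindIdxB_eq, pvCmb_assoc,
        pvCmb_firstIdx (fun s => PySem.Str.startswith (PySem.Str.lower s) (l ++ ":"))
          (fun s => rest.any fun l => PySem.Str.startswith (PySem.Str.lower s) (l ++ ":")) M 0]
      simp only [List.any_cons]
  rw [pvBestB, key labels none, pvCmb_none_left]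

-- --- someness of the extraction when some label matches ---

theorem pvLowerChar_colon (c : Char) (h : PySem.Chars.lowerChar c = ':') : c = ':' := by
  unfold PySem.Chars.lowerChar PySem.Chars.isupper at h
  split at h
  · exfalso
    rename_i hu
    simp only [Bool.and_eq_true, decide_eq_true_eq] at hu
    have hlo : 65 ≤ c.toNat := hu.1
    have hhi : c.toNat ≤ 90 := hu.2
    have ht : (Char.ofNat (c.toNat + 32)).toNat = c.toNat + 32 := by
      unfold Char.ofNat
      rw [dif_pos]
      · rfl
      · exact Or.inl (by exact_mod_cast (by omega : c.toNat + 32 < 55296))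
    have hcolon : (Char.ofNat (c.toNat + 32)).toNat = (':' : Char).toNat := by rw [h]
    rw [ht] at hcolon
    have : (':' : Char).toNat = 58 := by decide
    omega
  · exact h

theorem pvColon_mem (s l : String)
    (h : PySem.Str.startswith (PySem.Str.lower s) (l ++ ":") = true) : ':' ∈ s.toList := by
  rw [PySem.Str.startswith_eq] at h
  have hpre := (PySem.Chars.startswith_iff _ _).mp h
  have hmem : ':' ∈ (PySem.Str.lower s).toList := by
    apply hpre.mem
    have hl : (l ++ ":").toList = l.toList ++ [':'] := by
      simp [String.toList_append]
    rw [hl]; simp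
  rw [PySem.Str.toList_lower] at hmem
  have hlw : PySem.Chars.lower s.toList = s.toList.map PySem.Chars.lowerChar := rfl
  rw [hlw] at hmem
  obtain ⟨c, hc, hlc⟩ := List.mem_map.mp hmem
  rwa [pvLowerChar_colon c hlc] at hc

theorem pvGoZero (fuel : Nat) (l cur : List Char) (acc : List (List Char)) :
    PySem.Chars.splitOnMax.go [':'] fuel 0 l cur acc = ((cur.reverse ++ l) :: acc).reverse := by
  cases fuel <;> cases l <;> simp [PySem.Chars.splitOnMax.go]

theorem pvGoLen (fuel : Nat) (l : List Char) (hf : l.length < fuel) (hc : ':' ∈ l)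
    (cur : List Char) (acc : List (List Char)) :
    (PySem.Chars.splitOnMax.go [':'] fuel 1 l cur acc).length = acc.length + 2 := by
  induction fuel generalizing l cur acc with
  | zero => omega
  | succ f ih =>
    cases l with
    | nil => simp at hc
    | cons c rest =>
      simp only [PySem.Chars.splitOnMax.go]
      by_cases hpc : [':'].isPrefixOf (c :: rest) = true
      · rw [if_neg (by omega : ¬ (1 : Nat) = 0), if_pos hpc, pvGoZero]
        simp
      · rw [if_neg (by omega : ¬ (1 : Nat) = 0), if_neg hpc]
        have hcr : c ≠ ':' := by
          intro he; apply hpc; simp [List.isPrefixOf, he]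
        have hrest : ':' ∈ rest := by
          cases List.mem_cons.mp hc with
          | inl h => exact absurd h.symm hcr
          | inr h => exact h
        exact ih rest (by simp at hf ⊢; omega) hrest (c :: cur) acc

theorem pvExtract_some (s : String) (h : ':' ∈ s.toList) :
    ∃ v, pvExtractValue s = some v := by
  unfold pvExtractValue
  have hsep : (":" : String).toList = [':'] := by decide
  have hsm : PySem.Str.splitMax? s ":" 1 =
      some ((PySem.Chars.splitOnMax s.toList [':'] 1).map String.ofList) := by
    unfold PySem.Str.splitMax? PySem.Chars.splitMax?
    rw [hsep]
    simp
  have hlen : (PySem.Chars.splitOnMax s.toList [':'] 1).length = 2 := by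
    unfold PySem.Chars.splitOnMax
    rw [if_neg (by omega : ¬ (1 : Int) < 0)]
    have h1 : (1 : Int).toNat = 1 := rfl
    rw [h1]
    simpa using pvGoLen (s.toList.length + 1) s.toList (by omega) h [] []
  rw [hsm]
  set xs := (PySem.Chars.splitOnMax s.toList [':'] 1).map String.ofList with hxs
  have hxlen : xs.length = 2 := by simp [hxs, hlen]
  have h1 : ((1 : Nat) : Int) = (1 : Int) := rfl
  rw [Option.getD_some, ← h1, PySem.List.pyGet?_natCast]
  have hg : xs[1]? = some xs[1] := List.getElem?_eq_getElem (by omega)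
  rw [hg]
  exact ⟨_, rfl⟩

-- index shift for pvFirstIdx
theorem pvFirstIdx_shift (q : String → Bool) (M : List String) (k : Nat) :
    pvFirstIdx q M (k + 1) = (pvFirstIdx q M k).map (· + 1) := by
  induction M generalizing k with
  | nil => rfl
  | cons s rest ih =>
    simp only [pvFirstIdx]
    by_cases h : q s = true
    · simp [h]
    · simp only [Bool.not_eq_true] at h
      simp [h, ih]

-- A's inner loop returns the (label-independent) value iff some label matches
theorem pvInnerA_eq (stripped lowered : String) (labels : List String) :
    pvInnerA stripped lowered labels =
      if labels.any (fun label => PySem.Str.startswith lowered (label ++ ":")) then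
        pvExtractValue stripped
      else none := by
  induction labels with
  | nil => simp [pvInnerA]
  | cons label rest ih =>
    simp only [pvInnerA, List.any_cons, ih, Bool.or_eq_true]
    by_cases h : PySem.Str.startswith lowered (label ++ ":") = true
    · rw [if_pos h, if_pos (Or.inl h)]
    · rw [if_neg h]
      by_cases h2 : (rest.any fun label => PySem.Str.startswith lowered (label ++ ":")) = true
      · rw [if_pos h2, if_pos (Or.inr h2)]
      · rw [if_neg h2, if_neg (by tauto)]

-- main bridge: A's nested loops compute B's min-index form
theorem pvMain (labels : List String) (L : List String) :
    pvLinesA labels L =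
      (match pvFirstIdx (fun s => labels.any fun l =>
          PySem.Str.startswith (PySem.Str.lower s) (l ++ ":")) (L.map PySem.Str.strip) 0 with
       | none => none
       | some b =>
         match PySem.List.pyGet? (L.map PySem.Str.strip) (b : Int) with
         | some s => pvExtractValue s
         | none => none) := by
  induction L with
  | nil => rfl
  | cons line rest ih =>
    simp only [pvLinesA, List.map_cons]
    rw [pvInnerA_eq]
    by_cases hP : (labels.any fun l =>
        PySem.Str.startswith (PySem.Str.lower (PySem.Str.strip line)) (l ++ ":")) = true
    · -- some label matches the head line: extraction is some, both pick the head
      obtain ⟨l0, hl0mem, hl0⟩ := List.any_eq_true.mp hP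
      obtain ⟨v, hv⟩ := pvExtract_some (PySem.Str.strip line) (pvColon_mem _ l0 hl0)
      rw [if_pos hP, hv]
      simp only [pvFirstIdx, hP, if_true]
      have h0 : ((0 : Nat) : Int) = (0 : Int) := rfl
      simp only [PySem.List.pyGet?_natCast, List.getElem?_cons_zero, hv]
    · simp only [Bool.not_eq_true] at hP
      rw [if_neg (by rw [hP]; exact Bool.false_ne_true), ih]
      simp only [pvFirstIdx, hP, Bool.false_eq_true, if_false]
      rw [pvFirstIdx_shift]
      cases hb : pvFirstIdx (fun s => labels.any fun l =>
          PySem.Str.startswith (PySem.Str.lower s) (l ++ ":")) (rest.map PySem.Str.strip) 0 with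
      | none => rfl
      | some b =>
        simp only [Option.map_some, PySem.List.pyGet?_natCast, List.getElem?_cons_succ]

-- ===== VERDICT (by name: the statement is the Claim_ definition above) =====
theorem extract_labeled_value_py_spec : Claim_equal_extract_labeled_value_py := by
  intro text labels _
  show extract_labeled_value_py text labels = extract_labeled_value_py_alt text labels
  simp only [extract_labeled_value_py, extract_labeled_value_py_alt, pvMain, pvBestB_eq]
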